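-- pv_equiv track=rewrite | github.com/dair-iitd/openie6 | carb/wire57_evaluation.py | aggregate_exact_matches
-- ===== SOURCE A (Python) =====
-- def aggregate_exact_matches(match_matrix):
--     # For this agregation task, no predicted tuple can exact-match two gold
--     # ones, so it's easy, look at lines and columns looking for OR-total booleans.
--     recall = [sum([any(gold_matches) for gold_matches in match_matrix], 0), len(match_matrix)]
--     # ^ this is [3,5] for "3 out of 5", to be lumped together later.
--     if len(match_matrix[0]) == 0:
--         precision = [0, 0]  # N/A
--     else:
--         precision = [sum([any([g[i] for g in match_matrix]) for i in range(len(match_matrix[0]))], 0),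
--                      len(match_matrix[0])]
--     # f1 = 2 * precision * recall / (precision + recall)
--     metrics = {'precision': precision,
--                'recall': recall}
--     return metrics
-- ===== SOURCE B (Python) =====
-- def aggregate_exact_matches(match_matrix):
--     num_cols = len(match_matrix[0])
--     recall_count = 0
--     cols_with_match = set()
--     for row in match_matrix:
--         if any(row):
--             recall_count += 1
--         for i, v in enumerate(row[:num_cols]):
--             if v:
--                 cols_with_match.add(i)
--     if num_cols == 0:
--         precision = [0, 0]
--     else:
--         precision = [len(cols_with_match), num_cols]
--     return {'precision': precision, 'recall': [recall_count, len(match_matrix)]}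
-- ===== Notes on version B (the rewrite author's own statement) =====
-- stated objective: simpler
-- what changed: Replaces the per-column re-scan of the whole matrix (a nested comprehension per column) with a single pass over the rows that maintains the recall counter and a set of column indices that have a match; Pre_ excludes the inputs on which A raises IndexError (empty matrix, or a row shorter than the first row).
import Mathlib
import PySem

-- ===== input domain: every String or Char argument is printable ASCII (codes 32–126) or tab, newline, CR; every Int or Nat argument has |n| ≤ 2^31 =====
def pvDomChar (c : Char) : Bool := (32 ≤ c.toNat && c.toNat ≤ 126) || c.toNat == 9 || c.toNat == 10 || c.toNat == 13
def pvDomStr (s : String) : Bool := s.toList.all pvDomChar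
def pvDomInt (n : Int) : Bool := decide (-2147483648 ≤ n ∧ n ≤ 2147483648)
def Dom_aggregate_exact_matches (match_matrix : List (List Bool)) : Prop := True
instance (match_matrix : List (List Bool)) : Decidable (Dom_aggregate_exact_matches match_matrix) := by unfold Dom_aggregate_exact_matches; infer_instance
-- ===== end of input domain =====

-- B replaces A's per-column re-scan of the matrix with a single pass over the rows maintaining a
-- recall counter and a set of matched column indices (objective: simpler, same asymptotic cost).

-- ===== PORT A =====
-- sum([...bools...], 0) : Python sums booleans as 0/1 integers
def pySumBool (l : List Bool) : Int := l.foldl (fun a b => a + if b then 1 else 0) 0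

def aggregate_exact_matches (match_matrix : List (List Bool)) : List (String × List Int) :=
  let recallV : List Int :=
    [pySumBool (match_matrix.map (fun gold_matches => gold_matches.any id)), (match_matrix.length : Int)]
  -- match_matrix[0]: none = IndexError on the empty matrix, excluded by Pre_
  match PySem.List.pyGet? match_matrix 0 with
  | none => []
  | some row0 =>
    let precision : List Int :=
      if row0.length = 0 then [0, 0]
      else
        -- g[i]: exact under Pre_ (every row has length ≥ len(row0)); the default false is
        -- only reached outside Pre_, where Python A raises IndexError
        [pySumBool ((PySem.List.pyRange 0 (row0.length : Int) 1).map
            (fun i => (match_matrix.map (fun g => PySem.List.pyGetD g i false)).any id)),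
         (row0.length : Int)]
    [("precision", precision), ("recall", recallV)]

-- ===== PORT B =====
def aggregate_exact_matches_alt (match_matrix : List (List Bool)) : List (String × List Int) :=
  -- len(match_matrix[0]): none = IndexError on the empty matrix, excluded by Pre_
  match PySem.List.pyGet? match_matrix 0 with
  | none => []
  | some row0 =>
    let numCols := row0.length
    -- one pass: (recall_count, cols_with_match); row[:num_cols] = take (num_cols ≥ 0), exact
    let st := match_matrix.foldl
      (fun (st : Int × PySem.Set Int) row =>
        ((if row.any id then st.1 + 1 else st.1),
         (PySem.List.enumerate (row.take numCols)).foldl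
           (fun s p => if p.2 then PySem.Set.add s p.1 else s) st.2))
      (0, PySem.Set.empty)
    let precision : List Int :=
      if numCols = 0 then [0, 0] else [PySem.Set.len st.2, (numCols : Int)]
    [("precision", precision), ("recall", [st.1, (match_matrix.length : Int)])]

-- ===== PRECONDITION & SPEC =====
-- Pre_ excludes exactly the inputs on which Python A raises IndexError: the empty matrix
-- (match_matrix[0]) and matrices with a row shorter than the first row (g[i] in the column scan).
def Pre_aggregate_exact_matches (match_matrix : List (List Bool)) : Prop :=
  match_matrix ≠ [] ∧ ∀ row ∈ match_matrix, match_matrix.headI.length ≤ row.length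

instance (match_matrix : List (List Bool)) : Decidable (Pre_aggregate_exact_matches match_matrix) := by
  unfold Pre_aggregate_exact_matches; infer_instance

def pvWitness_aggregate_exact_matches : List (List Bool) := [[true, false], [false, true], [false, false]]

def Spec_aggregate_exact_matches (match_matrix : List (List Bool)) (out : List (String × List Int)) : Prop := out = aggregate_exact_matches_alt match_matrix
instance (match_matrix : List (List Bool)) (out : List (String × List Int)) : Decidable (Spec_aggregate_exact_matches match_matrix out) := by unfold Spec_aggregate_exact_matches; infer_instance

-- ===== CLAIM (what is proved, stated in full; the proofs are below) =====
def Claim_equal_aggregate_exact_matches : Prop := ∀ (match_matrix : List (List Bool)), Dom_aggregate_exact_matches match_matrix → Pre_aggregate_exact_matches match_matrix → Spec_aggregate_exact_matches match_matrix (aggregate_exact_matches match_matrix)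



-- ===== LEMMAS AND PROOFS =====

-- a 0/1 fold from a is a + countP
theorem pv_foldl_add_count {a : Type} (h : a -> Bool) (l : List a) (c : Int) :
    l.foldl (fun c x => c + if h x then 1 else 0) c = c + l.countP h := by
  induction l generalizing c with
  | nil => simp
  | cons x t ih => simp [List.countP_cons, ih]; split_ifs <;> ring

theorem pv_foldl_if_count {a : Type} (h : a -> Bool) (l : List a) (c : Int) :
    l.foldl (fun c x => if h x then c + 1 else c) c = c + l.countP h := by
  induction l generalizing c with
  | nil => simp
  | cons x t ih => simp [List.countP_cons, ih]; split_ifs <;> ring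

theorem pv_pySumBool_map {a : Type} (h : a -> Bool) (l : List a) :
    pySumBool (l.map h) = (l.countP h : Int) := by
  unfold pySumBool; rw [List.foldl_map, pv_foldl_add_count]; ring

-- B's one-pass fold over the (recall counter, column set) pair splits into two folds
theorem pv_pair_split (n : Nat) (l : List (List Bool)) : ∀ (x : Int) (y : PySem.Set Int),
    l.foldl (fun (st : Int × PySem.Set Int) row =>
        ((if row.any id then st.1 + 1 else st.1),
         (PySem.List.enumerate (row.take n)).foldl
           (fun s p => if p.2 then PySem.Set.add s p.1 else s) st.2)) (x, y)
    = (l.foldl (fun c row => if row.any id then c + 1 else c) x,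
       l.foldl (fun s row => (PySem.List.enumerate (row.take n)).foldl
           (fun s p => if p.2 then PySem.Set.add s p.1 else s) s) y) := by
  induction l with
  | nil => intro x y; rfl
  | cons r t ih => intro x y; simp only [List.foldl_cons, ih]

-- membership in the index-collecting fold
theorem pv_fold_add_mem (l : List (Int × Bool)) : ∀ (s : PySem.Set Int) (j : Int),
    j ∈ l.foldl (fun s p => if p.2 then PySem.Set.add s p.1 else s) s ↔
      j ∈ s ∨ ∃ p ∈ l, p.2 = true ∧ j = p.1 := by
  induction l with
  | nil => simp
  | cons p t ih =>
    intro s j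
    obtain ⟨i, v⟩ := p
    cases v <;> · simp [ih, PySem.Set.mem_add]; try tauto

theorem pv_fold_add_nodup (l : List (Int × Bool)) : ∀ (s : PySem.Set Int), s.Nodup ->
    (l.foldl (fun s p => if p.2 then PySem.Set.add s p.1 else s) s).Nodup := by
  induction l with
  | nil => exact fun s h => h
  | cons p t ih =>
    intro s hs
    apply ih
    dsimp only
    split
    · exact PySem.Set.nodup_add _ _ hs
    · exact hs

theorem pv_outer_mem (n : Nat) (m : List (List Bool)) : ∀ (s : PySem.Set Int) (j : Int),
    j ∈ m.foldl (fun s row => (PySem.List.enumerate (row.take n)).foldl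
        (fun s p => if p.2 then PySem.Set.add s p.1 else s) s) s ↔
      j ∈ s ∨ ∃ row ∈ m, ∃ p ∈ PySem.List.enumerate (row.take n) 0, p.2 = true ∧ j = p.1 := by
  induction m with
  | nil => simp
  | cons r t ih =>
    intro s j
    simp only [List.foldl_cons]
    rw [ih, pv_fold_add_mem]
    simp only [List.mem_cons]
    constructor
    · rintro ((h | ⟨p, hp, h2, h3⟩) | ⟨row, hrow, p, hp, h2, h3⟩)
      · exact Or.inl h
      · exact Or.inr ⟨r, Or.inl rfl, p, hp, h2, h3⟩
      · exact Or.inr ⟨row, Or.inr hrow, p, hp, h2, h3⟩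
    · rintro (h | ⟨row, hrow | hrow, p, hp, h2, h3⟩)
      · exact Or.inl (Or.inl h)
      · exact Or.inl (Or.inr ⟨p, hrow ▸ hp, h2, h3⟩)
      · exact Or.inr ⟨row, hrow, p, hp, h2, h3⟩

theorem pv_outer_nodup (n : Nat) (m : List (List Bool)) : ∀ (s : PySem.Set Int), s.Nodup ->
    (m.foldl (fun s row => (PySem.List.enumerate (row.take n)).foldl
        (fun s p => if p.2 then PySem.Set.add s p.1 else s) s) s).Nodup := by
  induction m with
  | nil => exact fun s h => h
  | cons r t ih => exact fun s hs => ih _ (pv_fold_add_nodup _ s hs)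

-- the collected set has the same length as A's per-column count
theorem pv_count_eq (n : Nat) (m : List (List Bool)) (hall : ∀ row ∈ m, n ≤ row.length) :
    ((m.foldl (fun (s : PySem.Set Int) row => (PySem.List.enumerate (row.take n)).foldl
        (fun s p => if p.2 then PySem.Set.add s p.1 else s) s) PySem.Set.empty).length : Int)
    = ((PySem.List.pyRange 0 (n : Int) 1).countP
        (fun i => (m.map (fun g => PySem.List.pyGetD g i false)).any id) : Int) := by
  rw [List.countP_eq_length_filter]
  congr 1
  refine List.Perm.length_eq ((List.perm_ext_iff_of_nodup
    (pv_outer_nodup n m _ (by simp [PySem.Set.empty]))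
    (List.Nodup.filter _ (PySem.List.nodup_pyRange_one 0 n))).2 ?_)
  intro j
  rw [pv_outer_mem, List.mem_filter, PySem.List.mem_pyRange_one]
  simp only [PySem.Set.empty, List.not_mem_nil, false_or, PySem.List.mem_enumerate_iff,
    List.any_eq_true, List.mem_map, id]
  constructor
  · rintro ⟨row, hrow, p, ⟨k, hk, rfl⟩, hp2, rfl⟩
    have hlen : n ≤ row.length := hall row hrow
    have hkn : k < n := by
      have := hk; simp [List.length_take] at this; omega
    refine ⟨⟨by omega, by omega⟩, ?_⟩
    refine ⟨true, ⟨row, hrow, ?_⟩, rfl⟩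
    have : PySem.List.pyGetD row ((0 : Int) + k) false = row[k] := by
      rw [show ((0 : Int) + k) = ((k : Nat) : Int) by ring]
      rw [PySem.List.pyGetD_natCast]
      exact List.getD_eq_getElem _ _ (by omega)
    rw [this]
    have hkt : k < (row.take n).length := hk
    calc row[k] = (row.take n)[k] := (List.getElem_take).symm
      _ = true := hp2
  · rintro ⟨⟨hj0, hjn⟩, b, ⟨row, hrow, hget⟩, hb⟩
    subst hb
    obtain ⟨k, rfl⟩ : ∃ k : Nat, j = (k : Int) := ⟨j.toNat, by omega⟩
    have hlen : n ≤ row.length := hall row hrow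
    have hkn : k < n := by exact_mod_cast hjn
    have hkt : k < (row.take n).length := by simp [List.length_take]; omega
    refine ⟨row, hrow, ((0 : Int) + k, (row.take n)[k]), ⟨k, hkt, rfl⟩, ?_, by ring⟩
    have h1 : (row.take n)[k] = row[k] := List.getElem_take
    have h2 : PySem.List.pyGetD row (k : Int) false = row[k] := by
      rw [PySem.List.pyGetD_natCast]
      exact List.getD_eq_getElem _ _ (by omega)
    rw [h1, ← h2, hget]

-- ===== VERDICT (by name: the statement is the Claim_ definition above) =====
theorem aggregate_exact_matches_spec : Claim_equal_aggregate_exact_matches := by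
  intro m _ hpre
  obtain ⟨hne, hall⟩ := hpre
  unfold Spec_aggregate_exact_matches
  cases m with
  | nil => exact absurd rfl hne
  | cons r0 rest =>
    have hall' : ∀ row ∈ r0 :: rest, r0.length ≤ row.length := by
      simpa [List.headI] using hall
    unfold aggregate_exact_matches aggregate_exact_matches_alt
    rw [PySem.List.pyGet?_zero_cons]
    simp only
    rw [pv_pair_split]
    have hrec : (r0 :: rest).foldl (fun c row => if row.any id then c + 1 else c) 0
        = pySumBool ((r0 :: rest).map (fun g => g.any id)) := by
      rw [pv_foldl_if_count, pv_pySumBool_map]; ring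
    by_cases h0 : r0.length = 0
    · rw [if_pos h0, if_pos h0, hrec]
    · rw [if_neg h0, if_neg h0, hrec]
      congr 2
      rw [pv_pySumBool_map, ← pv_count_eq r0.length (r0 :: rest) hall']
      simp [PySem.Set.len]
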